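-- pv_equiv track=rewrite | github.com/julio-lopezsanz/python-learning-journey | patrones_en_diccionarios/agrupacion_conteo_dict_anidados.py | user_login_logout
-- ===== SOURCE A (Python) =====
-- def user_login_logout(users_logs):
--     """
--     Cuenta los inicios y cierres de sesion de cada usuario
--     """
--
--     grouped = {}
--
--     for user,status in users_logs:
--
--         if user not in grouped:
--             grouped[user] = {}
--
--         if status in grouped[user]:
--             grouped[user][status] += 1
--         else:
--             grouped[user][status] = 1
--
--         #Solucion Pythonic:
--         #grouped.setdefault(user, {})
--         #grouped[user][status] = grouped[user].get(status, 0) + 1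
--     return grouped
-- ===== SOURCE B (Python) =====
-- def user_login_logout(users_logs):
--     """
--     Cuenta los inicios y cierres de sesion de cada usuario
--     """
--     groups = {}
--     for user, status in users_logs:
--         groups.setdefault(user, []).append(status)
--     return {u: {s: sts.count(s) for s in dict.fromkeys(sts)} for u, sts in groups.items()}
-- ===== Notes on version B (the rewrite author's own statement) =====
-- stated objective: alternative
-- what changed: Replaces the fused inline-increment nested-dict loop with a two-stage group-then-count pipeline: one pass groups each user's statuses into a list via setdefault, then a comprehension builds each user's counts from the deduplicated status list with list.count.
import Mathlib
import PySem

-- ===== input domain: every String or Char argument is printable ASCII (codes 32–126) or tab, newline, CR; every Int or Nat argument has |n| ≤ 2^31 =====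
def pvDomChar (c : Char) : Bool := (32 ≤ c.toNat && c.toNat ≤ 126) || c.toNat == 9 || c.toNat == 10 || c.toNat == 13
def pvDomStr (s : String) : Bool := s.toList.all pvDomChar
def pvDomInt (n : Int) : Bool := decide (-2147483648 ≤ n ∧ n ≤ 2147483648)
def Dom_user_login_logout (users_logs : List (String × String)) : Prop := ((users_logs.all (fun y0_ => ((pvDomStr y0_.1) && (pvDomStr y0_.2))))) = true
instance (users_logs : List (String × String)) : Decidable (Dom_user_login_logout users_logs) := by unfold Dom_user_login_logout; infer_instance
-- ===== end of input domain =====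

-- B replaces A's fused inline-increment nested-dict loop by a group-then-count pipeline
-- (group statuses per user, then count each user's list); alternative decomposition, same cost.


-- ===== PORT A =====
-- one iteration of A's loop body, literally: ensure grouped[user] exists, then branch on
-- 'status in grouped[user]' to increment or initialise
def pvStepA (grouped : PySem.Dict String (PySem.Dict String Int)) (p : String × String) :
    PySem.Dict String (PySem.Dict String Int) :=
  let grouped := if grouped.contains p.1 then grouped else grouped.insert p.1 PySem.Dict.empty
  let inner := grouped.getD p.1 PySem.Dict.empty
  if inner.contains p.2 then
    grouped.insert p.1 (inner.insert p.2 (inner.getD p.2 0 + 1))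
  else
    grouped.insert p.1 (inner.insert p.2 1)

def user_login_logout (users_logs : List (String × String)) : List (String × List (String × Int)) :=
  (users_logs.foldl pvStepA PySem.Dict.empty).items.map (fun q => (q.1, q.2.items))

-- ===== PORT B =====
-- groups.setdefault(user, []).append(status)
def pvStepB (groups : PySem.Dict String (List String)) (p : String × String) :
    PySem.Dict String (List String) :=
  groups.modify p.1 [] (fun xs => xs ++ [p.2])

def user_login_logout_alt (users_logs : List (String × String)) : List (String × List (String × Int)) :=
  (users_logs.foldl pvStepB PySem.Dict.empty).items.map
    (fun q => (q.1, (PySem.List.dedup q.2).map (fun s => (s, (q.2.count s : Int)))))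

-- ===== PRECONDITION & SPEC =====
def Spec_user_login_logout (users_logs : List (String × String)) (out : List (String × List (String × Int))) : Prop := out = user_login_logout_alt users_logs
instance (users_logs : List (String × String)) (out : List (String × List (String × Int))) : Decidable (Spec_user_login_logout users_logs out) := by unfold Spec_user_login_logout; infer_instance

-- ===== CLAIM (what is proved, stated in full; the proofs are below) =====
def Claim_equal_user_login_logout : Prop := ∀ (users_logs : List (String × String)), Dom_user_login_logout users_logs → Spec_user_login_logout users_logs (user_login_logout users_logs)

-- ===== LEMMAS AND PROOFS =====

-- A's step is exactly a nested 'modify' (Counter-style increment inside a grouping modify)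
theorem pvStepA_eq (d : PySem.Dict String (PySem.Dict String Int)) (p : String × String) :
    pvStepA d p = d.modify p.1 PySem.Dict.empty (fun inn => inn.modify p.2 0 (· + 1)) := by
  unfold pvStepA
  by_cases hu : d.contains p.1
  · simp only [hu, if_true, PySem.Dict.modify]
    by_cases hs : (d.getD p.1 PySem.Dict.empty).contains p.2
    · simp [hs]
    · rw [Bool.not_eq_true] at hs
      simp only [hs, Bool.false_eq_true, if_false, PySem.Dict.getD_of_not_contains _ _ hs]
      norm_num
  · simp only [Bool.not_eq_true] at hu
    simp only [hu, Bool.false_eq_true, if_false, PySem.Dict.modify,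
      PySem.Dict.getD_insert_self, PySem.Dict.getD_empty, PySem.Dict.contains_empty,
      PySem.Dict.insert_insert_self, PySem.Dict.getD_of_not_contains _ _ hu]
    norm_num

-- the loop invariant: same keys, unique keys, and A's inner dict is the Counter of B's list
theorem pv_loop_inv (l : List (String × String))
    (dA : PySem.Dict String (PySem.Dict String Int)) (dB : PySem.Dict String (List String))
    (hk : dA.keys = dB.keys) (hn : dB.keys.Nodup)
    (hv : ∀ u, dA.getD u PySem.Dict.empty = PySem.Dict.counter (dB.getD u [])) :
    (l.foldl pvStepA dA).keys = (l.foldl pvStepB dB).keys ∧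
    (l.foldl pvStepB dB).keys.Nodup ∧
    ∀ u, (l.foldl pvStepA dA).getD u PySem.Dict.empty
        = PySem.Dict.counter ((l.foldl pvStepB dB).getD u []) := by
  induction l generalizing dA dB with
  | nil => exact ⟨hk, hn, hv⟩
  | cons p l ih =>
    simp only [List.foldl_cons]
    apply ih
    · rw [pvStepA_eq]
      unfold pvStepB
      simp only [PySem.Dict.keys_modify]
      by_cases hu : dB.contains p.1
      · have huA : dA.contains p.1 = true := by
          rw [PySem.Dict.contains_eq_decide_mem_keys, hk, ← PySem.Dict.contains_eq_decide_mem_keys]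
          exact hu
        rw [PySem.Dict.keys_insert_of_contains _ _ huA,
          PySem.Dict.keys_insert_of_contains _ _ hu, hk]
      · simp only [Bool.not_eq_true] at hu
        have huA : dA.contains p.1 = false := by
          rw [PySem.Dict.contains_eq_decide_mem_keys, hk, ← PySem.Dict.contains_eq_decide_mem_keys]
          exact hu
        rw [PySem.Dict.keys_insert_of_not_contains _ _ huA,
          PySem.Dict.keys_insert_of_not_contains _ _ hu, hk]
    · unfold pvStepB
      exact PySem.Dict.nodup_keys_foldl_modify_key [p] Prod.fst [] (fun _ q xs => xs ++ [q.2]) dB hn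
    · intro u
      rw [pvStepA_eq]
      unfold pvStepB
      rw [PySem.Dict.getD_modify, PySem.Dict.getD_modify]
      by_cases h : u = p.1
      · simp only [h, if_true, hv p.1, PySem.Dict.counter_append_singleton]
      · simp only [h, if_false, hv u]

theorem user_login_logout_eq_alt (users_logs : List (String × String)) :
    user_login_logout users_logs = user_login_logout_alt users_logs := by
  obtain ⟨hk, hn, hv⟩ := pv_loop_inv users_logs PySem.Dict.empty PySem.Dict.empty rfl
    (by simp [PySem.Dict.keys_empty]) (fun u => by simp [PySem.Dict.getD_empty]; rfl)
  unfold user_login_logout user_login_logout_alt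
  have hnA : (users_logs.foldl pvStepA PySem.Dict.empty).keys.Nodup := hk ▸ hn
  rw [PySem.Dict.items_eq_map_keys _ hnA PySem.Dict.empty,
    PySem.Dict.items_eq_map_keys _ hn ([] : List String), hk,
    List.map_map, List.map_map]
  apply List.map_congr_left
  intro u _
  simp only [Function.comp_apply, hv u, PySem.Dict.items_counter, PySem.List.dedup_eq_ofList]

-- ===== VERDICT (by name: the statement is the Claim_ definition above) =====
theorem user_login_logout_spec : Claim_equal_user_login_logout := by
  intro users_logs _
  exact user_login_logout_eq_alt users_logs
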